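-- pv_equiv track=rewrite | github.com/RemigiuszWoj/PhD | src/motzkin.py | _delta_swap
-- ===== SOURCE A (Python) =====
-- from typing import List, Optional, Tuple
--
-- def _delta_swap(
--     pi: List[int],
--     i: int,
--     j: int,
--     boundary: List[int],
--     processing_times: List[List[int]],
--     base_cmax: int,
-- ) -> int:
--     """Return makespan delta for swapping endpoints of segment [i..j].
--
--     New local segment order: [pi[j]] + pi[i+1..j-1] + [pi[i]]. Middle stays unchanged.
--     We start from boundary column (state after i jobs), simulate swapped segment,
--     then simulate tail jobs j+1..n-1. Delta = new_cmax - base_cmax.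
--     """
--     m = len(processing_times)
--     n = len(pi)
--     col_prev = boundary[:]  # copy starting state
--     col = [0] * m
--
--     # First job after swap: pi[j]
--     job = pi[j]
--     col[0] = col_prev[0] + processing_times[0][job]
--     for r in range(1, m):
--         a = col[r - 1]
--         b = col_prev[r]
--         if a < b:
--             a = b
--         col[r] = a + processing_times[r][job]
--     col_prev, col = col, col_prev
--
--     # Middle of segment (i+1 .. j-1)
--     for t in range(i + 1, j):
--         job = pi[t]
--         col[0] = col_prev[0] + processing_times[0][job]
--         for r in range(1, m):
--             a = col[r - 1]
--             b = col_prev[r]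
--             if a < b:
--                 a = b
--             col[r] = a + processing_times[r][job]
--         col_prev, col = col, col_prev
--
--     # Last job of segment after swap: pi[i]
--     job = pi[i]
--     col[0] = col_prev[0] + processing_times[0][job]
--     for r in range(1, m):
--         a = col[r - 1]
--         b = col_prev[r]
--         if a < b:
--             a = b
--         col[r] = a + processing_times[r][job]
--     col_prev, col = col, col_prev
--
--     # Tail (jobs j+1 .. n-1)
--     for t in range(j + 1, n):
--         job = pi[t]
--         col[0] = col_prev[0] + processing_times[0][job]
--         for r in range(1, m):
--             a = col[r - 1]
--             b = col_prev[r]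
--             if a < b:
--                 a = b
--             col[r] = a + processing_times[r][job]
--         col_prev, col = col, col_prev
--
--     return col_prev[-1] - base_cmax
-- ===== SOURCE B (Python) =====
-- from typing import List
--
-- def _delta_swap(
--     pi: List[int],
--     i: int,
--     j: int,
--     boundary: List[int],
--     processing_times: List[List[int]],
--     base_cmax: int,
-- ) -> int:
--     """Row-major (machine-outer) simulation of the swapped schedule.
--
--     Build the effective job sequence once (endpoints swapped, middle and
--     tail unchanged), then sweep machine by machine, keeping one
--     completion-time row instead of two per-job columns.
--     """
--     n = len(pi)
--     seq = [pi[t] for t in [j, *range(i + 1, j), i, *range(j + 1, n)]]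
--     p0 = processing_times[0]
--     row = []
--     left = boundary[0]
--     for job in seq:
--         left = left + p0[job]
--         row.append(left)
--     for b_r, p_r in zip(boundary[1:], processing_times[1:]):
--         left = b_r
--         new_row = []
--         for job, up in zip(seq, row):
--             left = max(left, up) + p_r[job]
--             new_row.append(left)
--         row = new_row
--     return row[-1] - base_cmax
-- ===== Notes on version B (the rewrite author's own statement) =====
-- stated objective: alternative
-- what changed: B builds the effective job sequence once (Python index semantics included) and runs the flow-shop DP machine-major — one completion-time row per machine swept left to right — instead of A's job-major sweep maintaining two machine columns per job.
-- outside the precondition, e.g. on _delta_swap([0], 0, 0, [1, 7], [[2]], 0): A returns 7, B returns 5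
import Mathlib
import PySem

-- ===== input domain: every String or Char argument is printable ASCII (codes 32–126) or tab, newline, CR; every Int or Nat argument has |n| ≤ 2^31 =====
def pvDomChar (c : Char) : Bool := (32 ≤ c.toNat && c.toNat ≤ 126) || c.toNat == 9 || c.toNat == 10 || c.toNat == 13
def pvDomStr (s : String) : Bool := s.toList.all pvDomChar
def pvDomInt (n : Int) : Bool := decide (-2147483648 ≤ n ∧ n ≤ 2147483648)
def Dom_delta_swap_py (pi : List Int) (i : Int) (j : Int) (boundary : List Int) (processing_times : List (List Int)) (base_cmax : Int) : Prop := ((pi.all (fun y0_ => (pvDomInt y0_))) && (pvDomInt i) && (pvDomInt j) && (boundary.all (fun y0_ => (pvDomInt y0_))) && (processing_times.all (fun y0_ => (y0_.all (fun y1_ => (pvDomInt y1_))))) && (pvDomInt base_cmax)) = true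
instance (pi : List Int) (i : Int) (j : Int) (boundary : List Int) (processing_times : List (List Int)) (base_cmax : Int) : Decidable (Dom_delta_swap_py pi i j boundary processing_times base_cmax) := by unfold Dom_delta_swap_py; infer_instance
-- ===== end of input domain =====

-- B replaces A's job-major two-column sweep by a machine-major sweep keeping one
-- completion-time row over the rebuilt job sequence (objective: alternative decomposition).

-- ===== PORT A =====
-- xs[k] with Python indexing, total with default 0 (Pre_ keeps every access in range)
def pvIdx (xs : List Int) (k : Int) : Int := PySem.List.pyGetD xs k 0

-- A's inner machine loop 'for r in range(1, m)': structural recursion over the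
-- remaining previous-column entries and processing rows, carrying a = col[r-1]
def pvAInner (a : Int) (prev : List Int) (rows : List (List Int)) (job : Int) : List Int :=
  match prev, rows with
  | p :: ps, q :: qs =>
    let a' := if a < p then p else a
    let c := a' + pvIdx q job
    c :: pvAInner c ps qs job
  | _, _ => []

-- one whole column step of A (machine 0 special, then the r-loop)
def pvACol (prev : List Int) (pt : List (List Int)) (job : Int) : List Int :=
  match prev, pt with
  | p0 :: ps, q0 :: qs =>
    let c0 := p0 + pvIdx q0 job
    c0 :: pvAInner c0 ps qs job
  | _, _ => []

def delta_swap_py (pi : List Int) (i : Int) (j : Int) (boundary : List Int) (processing_times : List (List Int)) (base_cmax : Int) : Int :=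
  let n : Int := pi.length
  let col1 := pvACol boundary processing_times (pvIdx pi j)
  let col2 := (PySem.List.pyRange (i + 1) j 1).foldl (fun c t => pvACol c processing_times (pvIdx pi t)) col1
  let col3 := pvACol col2 processing_times (pvIdx pi i)
  let col4 := (PySem.List.pyRange (j + 1) n 1).foldl (fun c t => pvACol c processing_times (pvIdx pi t)) col3
  PySem.List.pyGetD col4 (-1) 0 - base_cmax

-- ===== PORT B =====
-- machine-0 row: running prefix 'left' seeded with boundary[0]
def pvBRow0 (left : Int) (p0 : List Int) (seq : List Int) : List Int :=
  match seq with
  | [] => []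
  | job :: rest =>
    let l := left + pvIdx p0 job
    l :: pvBRow0 l p0 rest

-- one machine-r row: 'for job, up in zip(seq, row)'
def pvBRow (left : Int) (pr : List Int) (seq : List Int) (row : List Int) : List Int :=
  match seq, row with
  | job :: s, up :: r =>
    let l := max left up + pvIdx pr job
    l :: pvBRow l pr s r
  | _, _ => []

def delta_swap_py_alt (pi : List Int) (i : Int) (j : Int) (boundary : List Int) (processing_times : List (List Int)) (base_cmax : Int) : Int :=
  let n : Int := pi.length
  let seq := (j :: (PySem.List.pyRange (i + 1) j 1 ++ i :: PySem.List.pyRange (j + 1) n 1)).map (fun t => pvIdx pi t)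
  let row0 := pvBRow0 (pvIdx boundary 0) (PySem.List.pyGetD processing_times 0 []) seq
  let rowF := (boundary.tail.zip processing_times.tail).foldl (fun row bp => pvBRow bp.1 bp.2 seq row) row0
  PySem.List.pyGetD rowF (-1) 0 - base_cmax

-- ===== PRECONDITION & SPEC =====
-- Pre_ is A's natural domain: at least one machine, one boundary entry per machine (with more
-- boundary entries than machines A still RETURNS, but the value echoes a stale surplus boundary
-- entry depending on buffer-swap parity — a defensible corner no caller would specify, excluded),
-- i and j valid Python indices of pi, and every accessed job id a valid Python index of every
-- machine row (A raises IndexError otherwise).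
def Pre_delta_swap_py (pi : List Int) (i : Int) (j : Int) (boundary : List Int) (processing_times : List (List Int)) (base_cmax : Int) : Prop :=
  processing_times ≠ [] ∧ boundary.length = processing_times.length ∧
  PySem.Raise.InRange pi.length i ∧ PySem.Raise.InRange pi.length j ∧
  ∀ t ∈ (j :: (PySem.List.pyRange (i + 1) j 1 ++ i :: PySem.List.pyRange (j + 1) (pi.length : Int) 1)),
    ∀ row ∈ processing_times, PySem.Raise.InRange row.length (PySem.List.pyGetD pi t 0)
instance (pi : List Int) (i : Int) (j : Int) (boundary : List Int) (processing_times : List (List Int)) (base_cmax : Int) : Decidable (Pre_delta_swap_py pi i j boundary processing_times base_cmax) := by unfold Pre_delta_swap_py; infer_instance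

def pvWitness_delta_swap_py : List Int × Int × Int × List Int × List (List Int) × Int :=
  ([0, 1], 0, 1, [0, 0], [[1, 2], [3, 4]], 5)

def Spec_delta_swap_py (pi : List Int) (i : Int) (j : Int) (boundary : List Int) (processing_times : List (List Int)) (base_cmax : Int) (out : Int) : Prop := out = delta_swap_py_alt pi i j boundary processing_times base_cmax
instance (pi : List Int) (i : Int) (j : Int) (boundary : List Int) (processing_times : List (List Int)) (base_cmax : Int) (out : Int) : Decidable (Spec_delta_swap_py pi i j boundary processing_times base_cmax out) := by unfold Spec_delta_swap_py; infer_instance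

-- ===== CLAIM (what is proved, stated in full; the proofs are below) =====
def Claim_equal_delta_swap_py : Prop := ∀ (pi : List Int) (i : Int) (j : Int) (boundary : List Int) (processing_times : List (List Int)) (base_cmax : Int), Dom_delta_swap_py pi i j boundary processing_times base_cmax → Pre_delta_swap_py pi i j boundary processing_times base_cmax → Spec_delta_swap_py pi i j boundary processing_times base_cmax (delta_swap_py pi i j boundary processing_times base_cmax)

-- ===== LEMMAS AND PROOFS =====

theorem pvWitness_ok : Dom_delta_swap_py pvWitness_delta_swap_py.1 pvWitness_delta_swap_py.2.1 pvWitness_delta_swap_py.2.2.1 pvWitness_delta_swap_py.2.2.2.1 pvWitness_delta_swap_py.2.2.2.2.1 pvWitness_delta_swap_py.2.2.2.2.2 ∧ Pre_delta_swap_py pvWitness_delta_swap_py.1 pvWitness_delta_swap_py.2.1 pvWitness_delta_swap_py.2.2.1 pvWitness_delta_swap_py.2.2.2.1 pvWitness_delta_swap_py.2.2.2.2.1 pvWitness_delta_swap_py.2.2.2.2.2 := by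
  constructor <;> decide

theorem pvBRow0_length (p0 : List Int) : ∀ (seq : List Int) (left : Int), (pvBRow0 left p0 seq).length = seq.length := by
  intro seq; induction seq with
  | nil => intro left; rfl
  | cons job rest ih => intro left; simp [pvBRow0, ih]

theorem pvBRow_length (pr : List Int) : ∀ (seq row : List Int) (left : Int), (pvBRow left pr seq row).length = min seq.length row.length := by
  intro seq
  induction seq with
  | nil => intro row left; cases row <;> simp [pvBRow]
  | cons a s ih =>
    intro row left
    cases row with
    | nil => simp [pvBRow]
    | cons u r => simp [pvBRow, ih]

theorem pvGetLastD_irrel {l : List Int} (h : l ≠ []) (d d' : Int) : l.getLastD d = l.getLastD d' := by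
  cases l with
  | nil => exact absurd rfl h
  | cons a t => rw [List.getLastD_cons, List.getLastD_cons]

-- machine-0 peel: the column fold over seq exposes machine 0 as B's prefix row
theorem pvL0 (p0 : List Int) (ps : List (List Int)) : ∀ (seq : List Int) (b0 : Int) (bs : List Int),
    seq.foldl (fun c job => pvACol c (p0 :: ps) job) (b0 :: bs)
      = (pvBRow0 b0 p0 seq).getLastD b0
        :: (seq.zip (pvBRow0 b0 p0 seq)).foldl (fun c jt => pvAInner jt.2 c ps jt.1) bs := by
  intro seq
  induction seq with
  | nil => intro b0 bs; simp [pvBRow0]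
  | cons job rest ih =>
    intro b0 bs
    simp only [List.foldl_cons]
    rw [show pvACol (b0 :: bs) (p0 :: ps) job
        = (b0 + pvIdx p0 job) :: pvAInner (b0 + pvIdx p0 job) bs ps job from rfl]
    rw [ih]
    rw [show pvBRow0 b0 p0 (job :: rest)
        = (b0 + pvIdx p0 job) :: pvBRow0 (b0 + pvIdx p0 job) p0 rest from rfl]
    simp only [List.getLastD_cons, List.zip_cons_cons, List.foldl_cons]

-- machine-r peel, same shape with the max-seeded row
theorem pvL1 (p : List Int) (ps : List (List Int)) : ∀ (seq tops : List Int) (b : Int) (bs : List Int),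
    (seq.zip tops).foldl (fun c jt => pvAInner jt.2 c (p :: ps) jt.1) (b :: bs)
      = (pvBRow b p seq tops).getLastD b
        :: (seq.zip (pvBRow b p seq tops)).foldl (fun c jt => pvAInner jt.2 c ps jt.1) bs := by
  intro seq
  induction seq with
  | nil => intro tops b bs; simp [pvBRow]
  | cons job s ih =>
    intro tops b bs
    cases tops with
    | nil => simp [pvBRow]
    | cons top ts =>
      have hmax : (if top < b then b else top) = max b top := by
        by_cases h : top < b
        · simp [h, max_eq_left (le_of_lt h)]
        · simp [h, max_eq_right (not_lt.mp h)]
      simp only [List.zip_cons_cons, List.foldl_cons]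
      rw [show pvAInner top (b :: bs) (p :: ps) job
          = ((if top < b then b else top) + pvIdx p job)
            :: pvAInner ((if top < b then b else top) + pvIdx p job) bs ps job from rfl]
      rw [hmax, ih]
      rw [show pvBRow b p (job :: s) (top :: ts)
          = (max b top + pvIdx p job) :: pvBRow (max b top + pvIdx p job) p s ts from rfl]
      simp only [List.getLastD_cons, List.zip_cons_cons, List.foldl_cons]

theorem pvFoldNil (l : List (Int × Int)) : l.foldl (fun c (jt : Int × Int) => pvAInner jt.2 c [] jt.1) [] = [] := by
  induction l with
  | nil => rfl
  | cons a t ih => simpa [pvAInner] using ih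

-- the loop interchange: column-major tail fold = row-major fold over the machines
theorem pvG (seq : List Int) (hseq : seq ≠ []) : ∀ (bsps : List (Int × List Int)) (tops : List Int), tops.length = seq.length →
    ((seq.zip tops).foldl (fun c jt => pvAInner jt.2 c (bsps.map Prod.snd) jt.1) (bsps.map Prod.fst)).getLastD (tops.getLastD 0)
      = (bsps.foldl (fun row bp => pvBRow bp.1 bp.2 seq row) tops).getLastD 0 := by
  intro bsps
  induction bsps with
  | nil =>
    intro tops h
    simp only [List.map_nil, List.foldl_nil]
    rw [pvFoldNil]
    rfl
  | cons bp rest ih =>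
    intro tops h
    obtain ⟨b, p⟩ := bp
    have hne : pvBRow b p seq tops ≠ [] := by
      intro hc
      have hl := pvBRow_length p seq tops b
      rw [hc] at hl
      simp only [List.length_nil] at hl
      have hs0 : seq.length ≠ 0 := fun h0 => hseq (List.eq_nil_of_length_eq_zero h0)
      omega
    simp only [List.map_cons, List.foldl_cons]
    rw [pvL1, List.getLastD_cons, pvGetLastD_irrel hne b 0]
    exact ih (pvBRow b p seq tops) (by rw [pvBRow_length]; omega)

theorem pvRowFold_length (seq : List Int) : ∀ (bsps : List (Int × List Int)) (tops : List Int), tops.length = seq.length →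
    ((bsps.foldl (fun row bp => pvBRow bp.1 bp.2 seq row) tops)).length = seq.length := by
  intro bsps; induction bsps with
  | nil => intro tops h; simpa using h
  | cons bp rest ih => intro tops h; exact ih _ (by simp [pvBRow_length, h])

theorem pvGetD_neg_one_getLastD (xs : List Int) (h : xs ≠ []) (d : Int) : PySem.List.pyGetD xs (-1) d = xs.getLastD d := by
  cases xs with
  | nil => exact absurd rfl h
  | cons a t =>
    rw [PySem.List.pyGetD_neg_one (a :: t) d (List.cons_ne_nil a t),
        List.getLast_eq_getLastD, List.getLastD_cons]

theorem pvMain (b0 : Int) (bs : List Int) (p0 : List Int) (ps : List (List Int))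
    (hlen : bs.length = ps.length) (seq : List Int) (hs : seq ≠ []) :
    PySem.List.pyGetD (seq.foldl (fun c job => pvACol c (p0 :: ps) job) (b0 :: bs)) (-1) 0
      = PySem.List.pyGetD ((bs.zip ps).foldl (fun row bp => pvBRow bp.1 bp.2 seq row) (pvBRow0 b0 p0 seq)) (-1) 0 := by
  have hrow0len : (pvBRow0 b0 p0 seq).length = seq.length := pvBRow0_length p0 seq b0
  have hrow0ne : pvBRow0 b0 p0 seq ≠ [] := by
    intro hc; apply hs; rw [hc] at hrow0len
    exact List.eq_nil_of_length_eq_zero hrow0len.symm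
  have hFlen := pvRowFold_length seq (bs.zip ps) (pvBRow0 b0 p0 seq) hrow0len
  have hFne : (bs.zip ps).foldl (fun row bp => pvBRow bp.1 bp.2 seq row) (pvBRow0 b0 p0 seq) ≠ [] := by
    intro hc; apply hs; rw [hc] at hFlen
    exact List.eq_nil_of_length_eq_zero hFlen.symm
  rw [pvL0, pvGetD_neg_one_getLastD _ (List.cons_ne_nil _ _) 0, List.getLastD_cons,
      pvGetLastD_irrel hrow0ne b0 0, pvGetD_neg_one_getLastD _ hFne 0]
  have hG := pvG seq hs (bs.zip ps) (pvBRow0 b0 p0 seq) hrow0len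
  rw [List.map_fst_zip (by omega : bs.length ≤ ps.length),
      List.map_snd_zip (by omega : ps.length ≤ bs.length)] at hG
  exact hG

-- ===== VERDICT (by name: the statement is the Claim_ definition above) =====
theorem delta_swap_py_spec : Claim_equal_delta_swap_py := by
  intro pi i j boundary pt base hdom hpre
  obtain ⟨hm, hlen, -⟩ := hpre
  obtain ⟨p0, ps, rfl⟩ : ∃ p0 ps, pt = p0 :: ps := by
    cases pt with
    | nil => exact absurd rfl hm
    | cons a l => exact ⟨a, l, rfl⟩
  obtain ⟨b0, bs, rfl⟩ : ∃ b0 bs, boundary = b0 :: bs := by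
    cases boundary with
    | nil => simp at hlen
    | cons a l => exact ⟨a, l, rfl⟩
  have hbs : bs.length = ps.length := by simpa using hlen
  unfold Spec_delta_swap_py delta_swap_py delta_swap_py_alt
  dsimp only
  have hassemble : (PySem.List.pyRange (j + 1) ((pi.length : Int)) 1).foldl
        (fun c t => pvACol c (p0 :: ps) (pvIdx pi t))
        (pvACol ((PySem.List.pyRange (i + 1) j 1).foldl
          (fun c t => pvACol c (p0 :: ps) (pvIdx pi t)) (pvACol (b0 :: bs) (p0 :: ps) (pvIdx pi j)))
          (p0 :: ps) (pvIdx pi i))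
      = ((j :: (PySem.List.pyRange (i + 1) j 1 ++ i :: PySem.List.pyRange (j + 1) ((pi.length : Int)) 1)).map
          (fun t => pvIdx pi t)).foldl (fun c job => pvACol c (p0 :: ps) job) (b0 :: bs) := by
    simp [List.foldl_map, List.foldl_append]
  rw [hassemble]
  rw [show pvIdx (b0 :: bs) 0 = b0 from by simp [pvIdx, PySem.List.pyGetD_zero_cons]]
  rw [show PySem.List.pyGetD (p0 :: ps) 0 ([] : List Int) = p0 from by simp [PySem.List.pyGetD_zero_cons]]
  rw [show (b0 :: bs).tail = bs from rfl, show (p0 :: ps).tail = ps from rfl]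
  congr 1
  exact pvMain b0 bs p0 ps hbs _ (by simp)
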